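-- pv_equiv track=rewrite | github.com/floresmandres/Proyecto-Programacion-I | EJERCICIO_6_-_PEPV_II[1].py | create_matriz
-- ===== SOURCE A (Python) =====
-- def create_matriz (N) :
--   matriz_1 = []
--   matriz_2 = []
--
--   last_position_impar = 0
--   last_position_par = 0
--
--   for i in range (1,N+1) :
--
--     lista = []
--
--
--     if i % 2 != 0 :
--       for j in range (1,N+1) :
--         lista.append(last_position_par + j )
--       last_position_impar = lista[-1]
--       matriz_1.append(lista)
--
--
--     if i % 2 == 0 :
--
--       for j in range (1,N+1) :
--         lista.append(last_position_impar + j)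
--       last_position_par = lista [-1]
--       matriz_2.insert(0,lista)
--
--   matriz_1.extend(matriz_2)
--   return matriz_1
-- ===== SOURCE B (Python) =====
-- def create_matriz(N):
--     order = [r for r in range(1, N + 1) if r % 2] + [r for r in range(N, 0, -1) if r % 2 == 0]
--     return [[(r - 1) * N + j for j in range(1, N + 1)] for r in order]
-- ===== Notes on version B (the rewrite author's own statement) =====
-- stated objective: simpler
-- what changed: B replaces A's stateful loop with chained last-value accumulators, two auxiliary matrices and front-insertion reversal by a closed form: it first builds the output row ordering (odd row indices ascending, then even row indices descending) and then emits each row directly as its consecutive block of integers.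
import Mathlib
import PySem

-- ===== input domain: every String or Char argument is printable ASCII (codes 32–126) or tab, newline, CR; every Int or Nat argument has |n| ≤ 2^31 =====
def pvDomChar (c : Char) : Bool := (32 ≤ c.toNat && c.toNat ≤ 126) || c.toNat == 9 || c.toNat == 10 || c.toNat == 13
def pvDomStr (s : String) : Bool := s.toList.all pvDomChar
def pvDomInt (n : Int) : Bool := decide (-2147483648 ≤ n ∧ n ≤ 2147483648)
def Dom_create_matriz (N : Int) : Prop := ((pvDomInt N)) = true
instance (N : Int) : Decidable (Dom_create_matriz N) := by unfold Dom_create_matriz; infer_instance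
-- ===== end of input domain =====

-- B replaces A's accumulator-chained double construction by the closed row ordering
-- (odd rows ascending, then even rows descending) with each row computed directly; objective: simpler.

-- ===== PORT A =====
-- one loop iteration of A; Python's two guards 'i % 2 != 0' / 'i % 2 == 0' are mutually
-- exclusive, so they are ported as if/else.  lista[-1] is ported with pyGetD's default 0:
-- the inner loop runs only when the outer loop does (1 ≤ i ≤ N), so lista is nonempty and
-- Python never raises there.
def stepA (N : Int) (s : List (List Int) × List (List Int) × Int × Int) (i : Int) :
    List (List Int) × List (List Int) × Int × Int :=
  let (m1, m2, li, lp) := s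
  if PySem.Int.mod i 2 ≠ 0 then
    let lista := (PySem.List.pyRange 1 (N + 1) 1).foldl (fun l j => l ++ [lp + j]) []
    (m1 ++ [lista], m2, PySem.List.pyGetD lista (-1) 0, lp)
  else
    let lista := (PySem.List.pyRange 1 (N + 1) 1).foldl (fun l j => l ++ [li + j]) []
    (m1, lista :: m2, li, PySem.List.pyGetD lista (-1) 0)

def create_matriz (N : Int) : List (List Int) :=
  let s := (PySem.List.pyRange 1 (N + 1) 1).foldl (stepA N) ([], [], 0, 0)
  s.1 ++ s.2.1

-- ===== PORT B =====
def create_matriz_alt (N : Int) : List (List Int) :=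
  let order :=
    (PySem.List.pyRange 1 (N + 1) 1).filter (fun r => decide (PySem.Int.mod r 2 ≠ 0)) ++
    (PySem.List.pyRange N 0 (-1)).filter (fun r => PySem.Int.mod r 2 == 0)
  order.map (fun r => (PySem.List.pyRange 1 (N + 1) 1).map (fun j => (r - 1) * N + j))

-- ===== PRECONDITION & SPEC =====
def Spec_create_matriz (N : Int) (out : List (List Int)) : Prop := out = create_matriz_alt N
instance (N : Int) (out : List (List Int)) : Decidable (Spec_create_matriz N out) := by unfold Spec_create_matriz; infer_instance

-- ===== CLAIM (what is proved, stated in full; the proofs are below) =====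
def Claim_equal_create_matriz : Prop := ∀ (N : Int), Dom_create_matriz N → Spec_create_matriz N (create_matriz N)

-- ===== LEMMAS AND PROOFS =====

-- row produced by B for row index r
def pvRow (N r : Int) : List Int := (PySem.List.pyRange 1 (N + 1) 1).map (fun j => (r - 1) * N + j)

def pvOdds (N k : Int) : List (List Int) :=
  ((PySem.List.pyRange 1 (k + 1) 1).filter (fun r => decide (PySem.Int.mod r 2 ≠ 0))).map (pvRow N)
def pvEvens (N k : Int) : List (List Int) :=
  ((PySem.List.pyRange k 0 (-1)).filter (fun r => PySem.Int.mod r 2 == 0)).map (pvRow N)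

-- A's inner loop builds the same row as B, and its last element is base + N
lemma listaA (N base : Int) :
    (PySem.List.pyRange 1 (N + 1) 1).foldl (fun l j => l ++ [base + j]) []
      = (PySem.List.pyRange 1 (N + 1) 1).map (fun j => base + j) := by
  simpa using PySem.List.foldl_append_singleton_eq_map (fun j => base + j) (PySem.List.pyRange 1 (N + 1) 1) []

lemma lista_last (N base : Int) (hN : 1 ≤ N) :
    PySem.List.pyGetD ((PySem.List.pyRange 1 (N + 1) 1).map (fun j => base + j)) (-1) 0
      = base + N := by
  rw [PySem.List.pyRange_one_succ_right hN, List.map_append]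
  exact PySem.List.pyGetD_neg_one_append_singleton _ _ _

lemma mod_two_cases (k : Int) : PySem.Int.mod k 2 = 0 ∨ PySem.Int.mod k 2 = 1 := by
  rw [PySem.Int.mod_eq_emod_of_pos (by omega : (0:Int) < 2)]; omega

lemma mod_two_succ (k : Int) (h : PySem.Int.mod k 2 = 0) : PySem.Int.mod (k + 1) 2 = 1 := by
  rw [PySem.Int.mod_eq_emod_of_pos (by omega : (0:Int) < 2)] at *; omega

lemma mod_two_succ' (k : Int) (h : PySem.Int.mod k 2 = 1) : PySem.Int.mod (k + 1) 2 = 0 := by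
  rw [PySem.Int.mod_eq_emod_of_pos (by omega : (0:Int) < 2)] at *; omega

lemma pvRow_eq (N k : Int) :
    pvRow N (k + 1) = (PySem.List.pyRange 1 (N + 1) 1).map (fun j => k * N + j) := by
  unfold pvRow; congr 1; funext j; ring

lemma pvOdds_succ_odd (N k : Int) (hk : 0 ≤ k) (h : PySem.Int.mod (k + 1) 2 = 1) :
    pvOdds N (k + 1) = pvOdds N k ++ [pvRow N (k + 1)] := by
  have h' : (k + 1) % 2 = 1 := by
    rw [← PySem.Int.mod_eq_emod_of_pos (by omega : (0:Int) < 2)]; exact h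
  unfold pvOdds
  rw [PySem.List.pyRange_one_succ_right (by omega : (1:Int) ≤ k + 1), List.filter_append,
      List.map_append]
  simp [h']

lemma pvOdds_succ_even (N k : Int) (hk : 0 ≤ k) (h : PySem.Int.mod (k + 1) 2 = 0) :
    pvOdds N (k + 1) = pvOdds N k := by
  have h' : (k + 1) % 2 = 0 := by
    rw [← PySem.Int.mod_eq_emod_of_pos (by omega : (0:Int) < 2)]; exact h
  unfold pvOdds
  rw [PySem.List.pyRange_one_succ_right (by omega : (1:Int) ≤ k + 1), List.filter_append,
      List.map_append]
  simp [h']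

lemma pvEvens_succ_even (N k : Int) (hk : 0 ≤ k) (h : PySem.Int.mod (k + 1) 2 = 0) :
    pvEvens N (k + 1) = pvRow N (k + 1) :: pvEvens N k := by
  have h' : (k + 1) % 2 = 0 := by
    rw [← PySem.Int.mod_eq_emod_of_pos (by omega : (0:Int) < 2)]; exact h
  unfold pvEvens
  rw [PySem.List.pyRange_neg_one_cons (by omega : (0:Int) < k + 1)]
  simp [h']

lemma pvEvens_succ_odd (N k : Int) (hk : 0 ≤ k) (h : PySem.Int.mod (k + 1) 2 = 1) :
    pvEvens N (k + 1) = pvEvens N k := by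
  have h' : (k + 1) % 2 = 1 := by
    rw [← PySem.Int.mod_eq_emod_of_pos (by omega : (0:Int) < 2)]; exact h
  unfold pvEvens
  rw [PySem.List.pyRange_neg_one_cons (by omega : (0:Int) < k + 1)]
  simp [h']

-- loop invariant of A's outer loop after the iterations i = 1 .. k
lemma invA (N : Int) (hN : 1 ≤ N) :
    ∀ k : Int, 0 ≤ k → k ≤ N →
      ∃ li lp,
        (PySem.List.pyRange 1 (k + 1) 1).foldl (stepA N) ([], [], 0, 0)
          = (pvOdds N k, pvEvens N k, li, lp)
        ∧ (PySem.Int.mod k 2 = 0 → lp = k * N)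
        ∧ (PySem.Int.mod k 2 = 1 → li = k * N) := by
  intro k hk
  induction k, hk using Int.le_induction with
  | base =>
      intro _
      refine ⟨0, 0, ?_, fun _ => by simp, fun h => by
        rw [PySem.Int.mod_eq_emod_of_pos (by omega : (0:Int) < 2)] at h; omega⟩
      have e2 : PySem.List.pyRange (0:Int) 0 (-1) = [] := PySem.List.pyRange_neg_one_eq_nil (by omega)
      simp [pvOdds, pvEvens, e2]
  | succ k hk0 ih =>
      intro hkN
      obtain ⟨li, lp, hfold, hlp, hli⟩ := ih (by omega)
      rw [PySem.List.pyRange_one_succ_right (by omega : (1:Int) ≤ k + 1),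
          List.foldl_append, hfold]
      rcases mod_two_cases k with hpar | hpar
      · -- k even, so i = k+1 is odd: the first branch fires with base lp = k*N
        have hmod := mod_two_succ k hpar
        refine ⟨(k + 1) * N, lp, ?_, fun h => by rw [hmod] at h; omega, fun _ => rfl⟩
        simp only [List.foldl, stepA, hmod, hlp hpar, listaA]
        rw [if_pos (by norm_num), lista_last N (k * N) hN,
            pvOdds_succ_odd N k hk0 hmod, pvEvens_succ_odd N k hk0 hmod, pvRow_eq]
        have : k * N + N = (k + 1) * N := by ring
        rw [this]
      · -- k odd, so i = k+1 is even: the second branch fires with base li = k*N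
        have hmod := mod_two_succ' k hpar
        refine ⟨li, (k + 1) * N, ?_, fun _ => rfl, fun h => by rw [hmod] at h; omega⟩
        simp only [List.foldl, stepA, hmod, hli hpar, listaA]
        rw [if_neg (by norm_num), lista_last N (k * N) hN,
            pvOdds_succ_even N k hk0 hmod, pvEvens_succ_even N k hk0 hmod, pvRow_eq]
        have : k * N + N = (k + 1) * N := by ring
        rw [this]

-- ===== VERDICT (by name: the statement is the Claim_ definition above) =====
theorem create_matriz_spec : Claim_equal_create_matriz := by
  intro N _
  unfold Spec_create_matriz
  by_cases hN : N ≤ 0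
  · unfold create_matriz create_matriz_alt
    rw [PySem.List.pyRange_one_eq_nil (by omega : N + 1 ≤ 1),
        PySem.List.pyRange_neg_one_eq_nil (by omega : N ≤ 0)]
    simp
  · obtain ⟨li, lp, h, -, -⟩ := invA N (by omega) N (by omega) le_rfl
    show ((PySem.List.pyRange 1 (N + 1) 1).foldl (stepA N) ([], [], 0, 0)).1 ++
         ((PySem.List.pyRange 1 (N + 1) 1).foldl (stepA N) ([], [], 0, 0)).2.1 = _
    rw [h]
    unfold create_matriz_alt pvOdds pvEvens pvRow
    simp [List.map_append]
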